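-- pv_equiv track=rewrite | github.com/LMaine22/alpha_v10 | alpha_discovery/search/ga_core.py | _infer_direction_from_metadata
-- ===== SOURCE A (Python) =====
-- from typing import List, Dict, Tuple, Optional, Iterable, Any
--
-- def _infer_direction_from_metadata(setup: List[str], signals_metadata: List[Dict]) -> str:
--     """Crude heuristic: count '<' as bearish; otherwise bullish; ties -> long."""
--     direction_score = 0
--     for sid in setup:
--         meta = next((m for m in signals_metadata if m.get("signal_id") == sid), None)
--         if meta and "<" in str(meta.get("condition", "")):
--             direction_score -= 1
--         else:
--             direction_score += 1
--     return "long" if direction_score >= 0 else "short"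
-- ===== SOURCE B (Python) =====
-- def _infer_direction_from_metadata(setup, signals_metadata):
--     """Single pass over signals_metadata against a multiplicity table of the setup:
--     tally bearish legs by metadata record (first record per signal_id wins), weighted
--     by how often that signal_id occurs in the setup; unmatched legs count as bullish."""
--     counts = {}
--     for sid in setup:
--         counts[sid] = counts.get(sid, 0) + 1
--     bear = 0
--     seen = set()
--     for m in signals_metadata:
--         sid = m.get("signal_id")
--         if sid is not None and sid not in seen:
--             seen.add(sid)
--             if "<" in str(m.get("condition", "")):
--                 bear += counts.get(sid, 0)
--     return "short" if 2 * bear > len(setup) else "long"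
-- ===== Notes on version B (the rewrite author's own statement) =====
-- stated objective: faster
-- what changed: B inverts the loop structure: instead of scanning signals_metadata once per setup element, it builds a multiplicity table of the setup and makes a single pass over signals_metadata, adding each first-seen bearish signal_id's setup multiplicity to a bear tally, then applies the majority test 2*bear > len(setup).
import Mathlib
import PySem

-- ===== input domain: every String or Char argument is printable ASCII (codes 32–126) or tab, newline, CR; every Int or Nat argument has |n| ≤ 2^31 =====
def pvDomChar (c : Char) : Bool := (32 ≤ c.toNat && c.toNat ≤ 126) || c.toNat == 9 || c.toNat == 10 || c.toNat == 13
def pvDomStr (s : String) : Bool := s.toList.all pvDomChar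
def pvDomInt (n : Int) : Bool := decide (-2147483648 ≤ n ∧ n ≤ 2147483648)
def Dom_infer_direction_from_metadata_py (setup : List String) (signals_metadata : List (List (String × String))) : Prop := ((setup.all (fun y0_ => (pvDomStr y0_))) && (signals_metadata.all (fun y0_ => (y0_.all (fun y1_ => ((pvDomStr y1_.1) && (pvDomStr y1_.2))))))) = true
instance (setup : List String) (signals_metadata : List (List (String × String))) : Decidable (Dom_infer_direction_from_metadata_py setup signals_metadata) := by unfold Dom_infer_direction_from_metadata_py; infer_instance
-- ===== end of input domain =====

-- B inverts the loop structure: one pass over signals_metadata against a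
-- multiplicity table of the setup (objective: faster, one pass over each list).

-- ===== PORT A =====
-- A: for each sid in setup, scan signals_metadata for the first m with m.get("signal_id") == sid;
-- bearish (−1) iff meta is truthy and '<' occurs in str(meta.get("condition","")); finally sign test.
def pvScoreA (setup : List String) (signals_metadata : List (List (String × String))) : Int :=
  setup.foldl (fun score sid =>
    match signals_metadata.find? (fun m => (PySem.Dict.mk m).get? "signal_id" == some sid) with
    | some m =>
        if (!m.isEmpty) && PySem.Str.isIn "<" (((PySem.Dict.mk m).get? "condition").getD "") then
          score - 1
        else
          score + 1
    | none => score + 1) 0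

def infer_direction_from_metadata_py (setup : List String) (signals_metadata : List (List (String × String))) : String :=
  if pvScoreA setup signals_metadata ≥ 0 then "long" else "short"

-- ===== PORT B =====
-- B: counts[sid] = multiplicity of sid in setup (the first loop of Source B)
def pvCounts (setup : List String) : PySem.Dict String Int :=
  setup.foldl (fun d sid => d.insert sid (d.getD sid 0 + 1)) PySem.Dict.empty

-- B: the single pass over signals_metadata with (seen, bear) state
def pvBearTally (setup : List String) (signals_metadata : List (List (String × String))) : PySem.Set String × Int :=
  let counts := pvCounts setup
  signals_metadata.foldl (fun (st : PySem.Set String × Int) m =>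
    match (PySem.Dict.mk m).get? "signal_id" with
    | some sid =>
        if PySem.Set.contains st.1 sid then st
        else
          if PySem.Str.isIn "<" (((PySem.Dict.mk m).get? "condition").getD "") then
            (PySem.Set.add st.1 sid, st.2 + counts.getD sid 0)
          else (PySem.Set.add st.1 sid, st.2)
    | none => st) (PySem.Set.empty, 0)

def infer_direction_from_metadata_py_alt (setup : List String) (signals_metadata : List (List (String × String))) : String :=
  if 2 * (pvBearTally setup signals_metadata).2 > (setup.length : Int) then "short" else "long"

-- ===== PRECONDITION & SPEC =====
def Spec_infer_direction_from_metadata_py (setup : List String) (signals_metadata : List (List (String × String))) (out : String) : Prop := out = infer_direction_from_metadata_py_alt setup signals_metadata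
instance (setup : List String) (signals_metadata : List (List (String × String))) (out : String) : Decidable (Spec_infer_direction_from_metadata_py setup signals_metadata out) := by unfold Spec_infer_direction_from_metadata_py; infer_instance

-- ===== CLAIM (what is proved, stated in full; the proofs are below) =====
def Claim_equal_infer_direction_from_metadata_py : Prop := ∀ (setup : List String) (signals_metadata : List (List (String × String))), Dom_infer_direction_from_metadata_py setup signals_metadata → Spec_infer_direction_from_metadata_py setup signals_metadata (infer_direction_from_metadata_py setup signals_metadata)

-- ===== LEMMAS AND PROOFS =====

-- the bearish flag of the first metadata record matching sid, as A computes it per sid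
def pvFirstBear (signals_metadata : List (List (String × String))) (sid : String) : Option Bool :=
  (signals_metadata.find? (fun m => (PySem.Dict.mk m).get? "signal_id" == some sid)).map
    (fun m => PySem.Str.isIn "<" (((PySem.Dict.mk m).get? "condition").getD ""))

theorem pvMkGet_ne_nil {m : List (String × String)} {k : String} {v : String}
    (h : (PySem.Dict.mk m).get? k = some v) : m.isEmpty = false := by
  cases m with
  | nil => simp [PySem.Dict.get?] at h
  | cons a t => rfl

-- split a countP at one value
theorem pvCountSplit (l : List String) (p : String → Bool) (sid : String) :
    l.countP p
      = l.countP (fun s => !(s == sid) && p s) + (if p sid then l.count sid else 0) := by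
  induction l with
  | nil => simp
  | cons x t ih =>
    by_cases hx : x = sid
    · subst hx
      by_cases hp : p x = true
      · simp [List.countP_cons, List.count_cons, hp, ih]; omega
      · simp only [Bool.not_eq_true] at hp
        simp [List.countP_cons, List.count_cons, hp, ih]
    · simp [List.countP_cons, List.count_cons, hx, ih]
      by_cases hp : p x = true <;> simp [hp] <;> omega

-- the metadata fold of B computes bear = number of setup legs whose first matching
-- metadata record (signal_id not yet seen) is bearish
theorem pvFoldBear (setup : List String) :
    ∀ (sms : List (List (String × String))) (seen : PySem.Set String) (bear : Int),
      (sms.foldl (fun (st : PySem.Set String × Int) m =>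
        match (PySem.Dict.mk m).get? "signal_id" with
        | some sid =>
            if PySem.Set.contains st.1 sid then st
            else
              if PySem.Str.isIn "<" (((PySem.Dict.mk m).get? "condition").getD "") then
                (PySem.Set.add st.1 sid, st.2 + (pvCounts setup).getD sid 0)
              else (PySem.Set.add st.1 sid, st.2)
        | none => st) (seen, bear)).2
      = bear + (setup.countP
          (fun s => !(PySem.Set.contains seen s) && (pvFirstBear sms s).getD false) : Int) := by
  intro sms
  induction sms with
  | nil =>
    intro seen bear
    simp [pvFirstBear]
  | cons m rest ih =>
    intro seen bear
    simp only [List.foldl_cons]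
    cases h : (PySem.Dict.mk m).get? "signal_id" with
    | none =>
      simp only [h]
      rw [ih]
      have : (fun s => !(PySem.Set.contains seen s) && (pvFirstBear (m :: rest) s).getD false)
           = (fun s => !(PySem.Set.contains seen s) && (pvFirstBear rest s).getD false) := by
        funext s
        simp [pvFirstBear, List.find?_cons, h]
      rw [this]
    | some sid =>
      simp only [h]
      by_cases hc : PySem.Set.contains seen sid = true
      · simp only [hc, if_true]
        rw [ih]
        have : (fun s => !(PySem.Set.contains seen s) && (pvFirstBear (m :: rest) s).getD false)
             = (fun s => !(PySem.Set.contains seen s) && (pvFirstBear rest s).getD false) := by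
          funext s
          by_cases hs : s = sid
          · subst hs
            have hmem : s ∈ seen := (PySem.Set.contains_iff seen s).mp hc
            simp [hmem]
          · have hne : sid ≠ s := fun hh => hs hh.symm
            have hff : ((PySem.Dict.mk m).get? "signal_id" == some s) = false := by
              simp [h, hne]
            simp [pvFirstBear, List.find?_cons, hff]
        rw [this]
      · simp only [Bool.not_eq_true] at hc
        simp only [hc, Bool.false_eq_true, if_false]
        set b := PySem.Str.isIn "<" (((PySem.Dict.mk m).get? "condition").getD "") with hb
        have hstep : (if b then (PySem.Set.add seen sid, bear + (pvCounts setup).getD sid 0)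
                      else (PySem.Set.add seen sid, bear))
            = (PySem.Set.add seen sid, bear + if b then (pvCounts setup).getD sid 0 else 0) := by
          by_cases hbb : b = true <;> simp [hbb]
        rw [hstep, ih]
        have hfb : pvFirstBear (m :: rest) sid = some b := by
          rw [hb]
          unfold pvFirstBear
          rw [List.find?_cons_of_pos (p := fun m => (PySem.Dict.mk m).get? "signal_id" == some sid) (by simp [h])]
          rfl
        have hadd : ∀ s, s ≠ sid →
            PySem.Set.contains (PySem.Set.add seen sid) s = PySem.Set.contains seen s := by
          intro s hs
          simp only [PySem.Set.contains_eq_listContains]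
          simp [PySem.Set.mem_add, hs]
        have haddself : PySem.Set.contains (PySem.Set.add seen sid) sid = true := by
          simp only [PySem.Set.contains_eq_listContains]
          simp [PySem.Set.mem_add]
        rw [pvCountSplit setup (fun s => !(PySem.Set.contains (PySem.Set.add seen sid) s) && (pvFirstBear rest s).getD false) sid,
            pvCountSplit setup (fun s => !(PySem.Set.contains seen s) && (pvFirstBear (m :: rest) s).getD false) sid]
        have hsame : (fun s => !(s == sid) && (!(PySem.Set.contains (PySem.Set.add seen sid) s) && (pvFirstBear rest s).getD false))
            = (fun s => !(s == sid) && (!(PySem.Set.contains seen s) && (pvFirstBear (m :: rest) s).getD false)) := by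
          funext s
          by_cases hs : s = sid
          · simp [hs]
          · have hne : sid ≠ s := fun hh => hs hh.symm
            have hff : ((PySem.Dict.mk m).get? "signal_id" == some s) = false := by
              simp [h, hne]
            simp [hadd s hs, pvFirstBear, List.find?_cons, hff, hs]
        rw [hsame]
        have hcnt : (pvCounts setup).getD sid 0 = (setup.count sid : Int) := by
          rw [pvCounts, PySem.Dict.foldl_insert_getD_add_one_eq_counter, PySem.Dict.getD_counter]
        simp only [haddself, hfb, hc, Option.getD_some, Bool.not_true, Bool.not_false,
          Bool.false_and, Bool.true_and, hcnt]
        by_cases hbb : b = true <;> simp [hbb] <;> push_cast <;> ring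

-- A's setup fold as length − 2·countP
theorem pvFoldl_pm (g : String → Bool) :
    ∀ (l : List String) (a : Int),
      l.foldl (fun s x => if g x then s - 1 else s + 1) a
        = a + l.length - 2 * (l.countP g : Int) := by
  intro l
  induction l with
  | nil => intro a; simp
  | cons x t ih =>
    intro a
    simp only [List.foldl_cons, List.countP_cons, List.length_cons]
    by_cases hx : g x = true
    · rw [if_pos hx, ih]; simp [hx]; push_cast; ring
    · rw [if_neg hx, ih]; simp [hx]; push_cast; ring

-- A's score in closed form
theorem pvScoreA_eq (setup : List String) (sms : List (List (String × String))) :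
    pvScoreA setup sms
      = 0 + setup.length - 2 * (setup.countP (fun s => (pvFirstBear sms s).getD false) : Int) := by
  unfold pvScoreA
  have hstep : (fun (score : Int) (sid : String) =>
      match sms.find? (fun m => (PySem.Dict.mk m).get? "signal_id" == some sid) with
      | some m =>
          if (!m.isEmpty) && PySem.Str.isIn "<" (((PySem.Dict.mk m).get? "condition").getD "") then
            score - 1
          else
            score + 1
      | none => score + 1)
      = (fun (score : Int) (sid : String) =>
          if (pvFirstBear sms sid).getD false then score - 1 else score + 1) := by
    funext score sid
    cases hf : sms.find? (fun m => (PySem.Dict.mk m).get? "signal_id" == some sid) with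
    | none => simp [pvFirstBear, hf]
    | some m =>
      have hp := List.find?_some hf
      simp only [beq_iff_eq] at hp
      have hne := pvMkGet_ne_nil hp
      simp [pvFirstBear, hf, hne]
  rw [hstep, pvFoldl_pm]

-- B's bear tally in closed form
theorem pvBearTally_eq (setup : List String) (sms : List (List (String × String))) :
    (pvBearTally setup sms).2
      = (setup.countP (fun s => (pvFirstBear sms s).getD false) : Int) := by
  have e : (pvBearTally setup sms).2
      = (sms.foldl (fun (st : PySem.Set String × Int) m =>
          match (PySem.Dict.mk m).get? "signal_id" with
          | some sid =>
              if PySem.Set.contains st.1 sid then st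
              else
                if PySem.Str.isIn "<" (((PySem.Dict.mk m).get? "condition").getD "") then
                  (PySem.Set.add st.1 sid, st.2 + (pvCounts setup).getD sid 0)
                else (PySem.Set.add st.1 sid, st.2)
          | none => st) (PySem.Set.empty, 0)).2 := rfl
  rw [e, pvFoldBear setup sms PySem.Set.empty 0]
  have hemp : (fun s => !(PySem.Set.contains PySem.Set.empty s) && (pvFirstBear sms s).getD false)
      = (fun s => (pvFirstBear sms s).getD false) := by
    funext s
    simp [PySem.Set.empty, PySem.Set.contains_eq_listContains]
  rw [hemp]
  ring

-- ===== VERDICT (by name: the statement is the Claim_ definition above) =====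
theorem infer_direction_from_metadata_py_spec : Claim_equal_infer_direction_from_metadata_py := by
  intro setup sms _
  unfold Spec_infer_direction_from_metadata_py
  unfold infer_direction_from_metadata_py infer_direction_from_metadata_py_alt
  rw [pvScoreA_eq, pvBearTally_eq]
  have hb : ((setup.countP (fun s => (pvFirstBear sms s).getD false)) : Int) ≤ setup.length := by
    exact_mod_cast List.countP_le_length ..
  split_ifs with h1 h2
  · exfalso; omega
  · rfl
  · rfl
  · exfalso; omega
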